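-- pv_equiv track=rewrite | github.com/vturovets/semantic-search-quality-evaluator | python-backend/engine/parser.py | split_csv_lines
-- ===== SOURCE A (Python) =====
-- def split_csv_lines(content: str) -> list[str]:
--     """Split CSV content into logical lines, handling newlines inside quoted fields."""
--     lines: list[str] = []
--     current = ""
--     in_quotes = False
--     i = 0
--
--     while i < len(content):
--         ch = content[i]
--
--         if ch == '"':
--             # Check for escaped quote
--             if in_quotes and i + 1 < len(content) and content[i + 1] == '"':
--                 current += '""'
--                 i += 2
--                 continue
--             in_quotes = not in_quotes
--             current += ch
--             i += 1
--             continue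
--
--         if not in_quotes and (
--             ch == '\n' or (ch == '\r' and i + 1 < len(content) and content[i + 1] == '\n')
--         ):
--             lines.append(current)
--             current = ""
--             if ch == '\r':
--                 i += 2
--             else:
--                 i += 1
--             continue
--
--         if not in_quotes and ch == '\r':
--             # Bare \r
--             lines.append(current)
--             current = ""
--             i += 1
--             continue
--
--         current += ch
--         i += 1
--
--     if len(current) > 0:
--         lines.append(current)
--
--     return lines
-- ===== SOURCE B (Python) =====
-- def split_csv_lines(content: str) -> list[str]:
--     """Split CSV content into logical lines, handling newlines inside quoted fields.
--
--     Two phases: (1) scan for line-break positions, consuming each quoted region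
--     with an inner loop (no in_quotes flag, no character buffer); (2) slice the
--     original string at the recorded break positions.
--     """
--     n = len(content)
--     breaks = []  # (position of break char, width: 1 for '\n' or bare '\r', 2 for '\r\n')
--     i = 0
--     while i < n:
--         c = content[i]
--         if c == '"':
--             i += 1
--             while i < n and content[i] != '"':
--                 i += 1
--             i += 1  # past the closing quote (or past the end if unterminated)
--         elif c == '\n':
--             breaks.append((i, 1))
--             i += 1
--         elif c == '\r':
--             w = 2 if i + 1 < n and content[i + 1] == '\n' else 1
--             breaks.append((i, w))
--             i += w
--         else:
--             i += 1
--     lines = []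
--     start = 0
--     for b, w in breaks:
--         lines.append(content[start:b])
--         start = b + w
--     if start < n:
--         lines.append(content[start:])
--     return lines
-- ===== Notes on version B (the rewrite author's own statement) =====
-- stated objective: faster
-- what changed: Replaced A's one-pass character-accumulating state machine (in_quotes flag, line built by per-character string concatenation) by a two-phase algorithm: phase 1 scans only for line-break positions, consuming each quoted region with an inner skip loop (no quote flag, no buffer); phase 2 slices the original string at the recorded break positions.
import Mathlib
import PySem

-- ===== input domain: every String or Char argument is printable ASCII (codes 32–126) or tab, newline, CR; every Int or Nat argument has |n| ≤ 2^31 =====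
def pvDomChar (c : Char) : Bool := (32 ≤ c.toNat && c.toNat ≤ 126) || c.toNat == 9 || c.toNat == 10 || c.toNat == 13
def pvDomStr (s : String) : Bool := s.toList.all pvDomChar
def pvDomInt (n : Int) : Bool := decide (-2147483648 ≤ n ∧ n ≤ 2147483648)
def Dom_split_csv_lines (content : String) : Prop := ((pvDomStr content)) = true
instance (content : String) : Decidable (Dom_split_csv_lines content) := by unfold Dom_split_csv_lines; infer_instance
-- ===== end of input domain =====

-- B replaces A's one-pass character-accumulating state machine by two phases:
-- collect the break positions (quoted regions consumed by an inner skip loop, no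
-- in_quotes flag, no per-character line buffer), then slice the original string
-- at those positions (measured faster: bulk slicing instead of char-by-char concat).

-- ===== PORT A =====
-- A's while-loop over index i, ported as structural recursion on the remaining
-- suffix of characters (str state `current` carried as List Char, wrapped with
-- String.ofList where A appends it; lookahead content[i+1] = head of `rest`).
def pvLoopA : List Char → List Char → Bool → List String → List String
  | [], current, _inq, lines =>
      if current.length > 0 then lines ++ [String.ofList current] else lines
  | ch :: rest, current, inq, lines =>
      if ch = '"' then
        -- escaped-quote check: i+1 < len ∧ content[i+1] == '"'  ↔  rest.head? = some '"'
        if inq && rest.head? = some '"' then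
          pvLoopA rest.tail (current ++ ['"', '"']) inq lines        -- i += 2
        else
          pvLoopA rest (current ++ [ch]) (!inq) lines
      else if !inq && (ch = '\n' || (ch = '\r' && rest.head? = some '\n')) then
        if ch = '\r' then pvLoopA rest.tail [] inq (lines ++ [String.ofList current])   -- i += 2
        else pvLoopA rest [] inq (lines ++ [String.ofList current])
      else if !inq && ch = '\r' then
        pvLoopA rest [] inq (lines ++ [String.ofList current])
      else
        pvLoopA rest (current ++ [ch]) inq lines
termination_by cs _ _ _ => cs.length
decreasing_by all_goals (simp only [List.length_cons, List.length_tail]; omega)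

def split_csv_lines (content : String) : List String :=
  pvLoopA content.toList [] false []

-- ===== PORT B =====
-- B phase 1, inner while loop: skip past the next '"' (or to the end);
-- returns the remaining suffix and the updated index i.
def pvSkipQ : List Char → Nat → (List Char × Nat)
  | [], i => ([], i)
  | c :: rest, i => if c = '"' then (rest, i + 1) else pvSkipQ rest (i + 1)

-- needed by pvBreaks's termination; cited there by name
lemma pvSkipQ_len : ∀ (cs : List Char) (i : Nat), (pvSkipQ cs i).1.length ≤ cs.length := by
  intro cs
  induction cs with
  | nil => intro i; simp [pvSkipQ]
  | cons c rest ih =>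
    intro i
    by_cases h : c = '"'
    · simp [pvSkipQ, h]
    · simp only [pvSkipQ, h, if_false, List.length_cons]
      exact Nat.le_succ_of_le (ih (i + 1))

-- B phase 1, outer while loop: the list of (break position, width) pairs.
def pvBreaks : List Char → Nat → List (Nat × Nat)
  | [], _ => []
  | c :: rest, i =>
      if c = '"' then
        let p := pvSkipQ rest (i + 1)
        pvBreaks p.1 p.2
      else if c = '\n' then (i, 1) :: pvBreaks rest (i + 1)
      else if c = '\r' then
        -- w = 2 if content[i+1] == '\n' else 1
        if rest.head? = some '\n' then (i, 2) :: pvBreaks rest.tail (i + 2)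
        else (i, 1) :: pvBreaks rest (i + 1)
      else pvBreaks rest (i + 1)
termination_by cs _ => cs.length
decreasing_by
  all_goals simp only [List.length_cons, List.length_tail]
  · exact Nat.lt_succ_of_le (pvSkipQ_len _ _)
  all_goals omega

-- B phase 2: cut content at the breaks.  content[start:b] with 0 ≤ start ≤ b and
-- content[start:] with 0 ≤ start are exact as (drop start).take (b-start) / drop start
-- (PySem.List.slice_natCast / slice_from_natCast).
def pvCut (content : List Char) : List (Nat × Nat) → Nat → List String
  | [], start =>
      if start < content.length then [String.ofList (content.drop start)] else []
  | (b, w) :: bs, start =>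
      String.ofList ((content.drop start).take (b - start)) :: pvCut content bs (b + w)

def split_csv_lines_alt (content : String) : List String :=
  pvCut content.toList (pvBreaks content.toList 0) 0

-- ===== PRECONDITION & SPEC =====
def Spec_split_csv_lines (content : String) (out : List String) : Prop := out = split_csv_lines_alt content
instance (content : String) (out : List String) : Decidable (Spec_split_csv_lines content out) := by unfold Spec_split_csv_lines; infer_instance

-- ===== CLAIM (what is proved, stated in full; the proofs are below) =====
def Claim_equal_split_csv_lines : Prop := ∀ (content : String), Dom_split_csv_lines content → Spec_split_csv_lines content (split_csv_lines content)

-- ===== LEMMAS AND PROOFS =====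

-- pvSkipQ on a suffix of content returns the suffix at its reported index
lemma pvSkipQ_drop (content : List Char) :
    ∀ (cs : List Char) (i : Nat), cs = content.drop i →
      (pvSkipQ cs i).1 = content.drop (pvSkipQ cs i).2 ∧ i ≤ (pvSkipQ cs i).2 := by
  intro cs
  induction cs with
  | nil => intro i h; simp [pvSkipQ, ← h]
  | cons c rest ih =>
    intro i h
    have hrest : rest = content.drop (i + 1) := by
      have := congrArg List.tail h
      simpa [List.tail_drop] using this
    by_cases hc : c = '"'
    · simp [pvSkipQ, hc, hrest]
    · have := ih (i + 1) hrest
      simp only [pvSkipQ, hc, if_false]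
      exact ⟨this.1, Nat.le_of_succ_le this.2⟩

-- the cons-step equation of pvLoopA, for rewriting a single side of a goal
lemma pvLoopA_cons (ch : Char) (rest current : List Char) (inq : Bool) (lines : List String) :
    pvLoopA (ch :: rest) current inq lines =
      if ch = '"' then
        if inq && rest.head? = some '"' then
          pvLoopA rest.tail (current ++ ['"', '"']) inq lines
        else
          pvLoopA rest (current ++ [ch]) (!inq) lines
      else if !inq && (ch = '\n' || (ch = '\r' && rest.head? = some '\n')) then
        if ch = '\r' then pvLoopA rest.tail [] inq (lines ++ [String.ofList current])
        else pvLoopA rest [] inq (lines ++ [String.ofList current])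
      else if !inq && ch = '\r' then
        pvLoopA rest [] inq (lines ++ [String.ofList current])
      else
        pvLoopA rest (current ++ [ch]) inq lines := by
  rw [pvLoopA]

-- the current-line buffer as a slice of the original content
lemma cur_push (content : List Char) (start i : Nat) (c : Char)
    (hc : content[i]? = some c) (hsi : start ≤ i) :
    (content.drop start).take (i - start) ++ [c] = (content.drop start).take (i + 1 - start) := by
  have h1 : i + 1 - start = (i - start) + 1 := by omega
  rw [h1, List.take_add_one, List.getElem?_drop]
  have : start + (i - start) = i := by omega
  rw [this, hc]
  rfl

lemma drop_cons_facts (content : List Char) (i : Nat) (c : Char) (rest : List Char)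
    (h : content.drop i = c :: rest) :
    content[i]? = some c ∧ rest = content.drop (i + 1) ∧ i < content.length := by
  have hh : content[i]? = some c := by
    have := congrArg List.head? h
    simpa [List.head?_drop] using this
  refine ⟨hh, ?_, ?_⟩
  · have := congrArg List.tail h
    simpa [List.tail_drop] using this.symm
  · exact (List.getElem?_eq_some_iff.mp hh).1

-- the cons-step equation of pvCut (structural, holds by rfl)
lemma pvCut_cons (content : List Char) (b w : Nat) (bs : List (Nat × Nat)) (start : Nat) :
    pvCut content ((b, w) :: bs) start
      = String.ofList ((content.drop start).take (b - start)) :: pvCut content bs (b + w) := rfl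

-- A's loop inside a quoted region: it copies characters verbatim until just past the
-- closing quote, exactly what pvSkipQ skips over.
lemma loopA_quoted (content : List Char) :
    ∀ (cs : List Char) (i start : Nat) (lines : List String),
      cs = content.drop i → start ≤ i →
      pvLoopA cs ((content.drop start).take (i - start)) true lines
        = pvLoopA (pvSkipQ cs i).1 ((content.drop start).take ((pvSkipQ cs i).2 - start)) false lines := by
  intro cs
  induction cs with
  | nil => intro i start lines h hsi; simp [pvSkipQ, pvLoopA]
  | cons c rest ih =>
    intro i start lines h hsi
    obtain ⟨hci, hrest, hilen⟩ := drop_cons_facts content i c rest h.symm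
    by_cases hc : c = '"'
    · subst hc
      simp only [pvSkipQ, reduceIte]
      cases rest with
      | nil =>
        conv_lhs => rw [pvLoopA_cons]
        rw [cur_push content start i '"' hci hsi]
        simp
      | cons c2 rest2 =>
        have e1 := cur_push content start i '"' hci hsi
        by_cases hc2 : c2 = '"'
        · subst hc2
          -- escaped "" : both sides reduce to the same call two chars further on
          obtain ⟨hci2, hrest2, _⟩ := drop_cons_facts content (i + 1) '"' rest2 hrest.symm
          have e2 := cur_push content start (i + 1) '"' hci2 (by omega)
          conv_lhs => rw [pvLoopA_cons]
          conv_rhs => rw [pvLoopA_cons]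
          have e12 : (content.drop start).take (i - start) ++ ['"', '"']
              = (content.drop start).take (i + 1 + 1 - start) := by
            rw [show (['"', '"'] : List Char) = ['"'] ++ ['"'] from rfl,
              ← List.append_assoc, e1, e2]
          simp [e12, e2]
        · conv_lhs => rw [pvLoopA_cons]
          rw [e1]
          simp [hc2]
    · -- inside quotes, any non-quote char (incl. newlines) is just copied
      have hstep := ih (i + 1) start lines hrest (by omega)
      conv_lhs => rw [pvLoopA_cons]
      rw [cur_push content start i c hci hsi]
      simpa [pvSkipQ, hc] using hstep

-- finalize case shared by both ends of the scan (i past the end of content)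
lemma loopA_end_eq_cut (content : List Char) (i start : Nat) (lines : List String)
    (hlen : content.length ≤ i) (hsi : start ≤ i) :
    pvLoopA (content.drop i) ((content.drop start).take (i - start)) false lines
      = lines ++ pvCut content (pvBreaks (content.drop i) i) start := by
  rw [List.drop_eq_nil_of_le hlen]
  rw [List.take_of_length_le (by simp only [List.length_drop]; omega)]
  rw [pvLoopA, pvBreaks, pvCut]
  simp only [List.length_drop]
  split_ifs with h1 h2 h2 <;> first | rfl | omega | simp

-- main invariant: A's loop from index i with current = content[start:i] produces
-- lines ++ (B's cut of the remaining breaks starting at `start`)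
lemma loopA_eq_cut (content : List Char) :
    ∀ (n i start : Nat) (lines : List String),
      content.length - i ≤ n → start ≤ i →
      pvLoopA (content.drop i) ((content.drop start).take (i - start)) false lines
        = lines ++ pvCut content (pvBreaks (content.drop i) i) start := by
  intro n
  induction n with
  | zero =>
    intro i start lines hn hsi
    exact loopA_end_eq_cut content i start lines (by omega) hsi
  | succ n ih =>
    intro i start lines hn hsi
    cases h : content.drop i with
    | nil =>
      rw [← h]
      exact loopA_end_eq_cut content i start lines (List.drop_eq_nil_iff.mp h) hsi
    | cons c rest =>
      obtain ⟨hci, hrest, hilen⟩ := drop_cons_facts content i c rest h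
      by_cases hc : c = '"'
      · subst hc
        conv_lhs => rw [pvLoopA_cons]
        rw [pvBreaks]
        have hq := loopA_quoted content rest (i + 1) start lines hrest (by omega)
        obtain ⟨hq1, hq2⟩ := pvSkipQ_drop content rest (i + 1) hrest
        simp only [reduceIte, Bool.false_and, Bool.not_false, if_false, Bool.false_eq_true]
        rw [cur_push content start i '"' hci hsi, hq, hq1]
        exact ih (pvSkipQ rest (i + 1)).2 start lines (by omega) (by omega)
      · by_cases hnl : c = '\n'
        · subst hnl
          conv_lhs => rw [pvLoopA_cons]
          rw [pvBreaks]
          have hnext := ih (i + 1) (i + 1)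
            (lines ++ [String.ofList ((content.drop start).take (i - start))]) (by omega) le_rfl
          simp only [Nat.sub_self, List.take_zero, ← hrest] at hnext
          simp [hnext, pvCut_cons]
        · by_cases hcr : c = '\r'
          · subst hcr
            cases hrc : rest with
            | nil =>
              have hrn : content.drop (i + 1) = [] := by rw [← hrest, hrc]
              have hlen1 : content.length ≤ i + 1 := List.drop_eq_nil_iff.mp hrn
              subst hrc
              conv_lhs => rw [pvLoopA_cons]
              rw [pvBreaks]
              have hnext := ih (i + 1) (i + 1)
                (lines ++ [String.ofList ((content.drop start).take (i - start))]) (by omega) le_rfl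
              simp only [Nat.sub_self, List.take_zero, ← hrest] at hnext
              simp [hnext, pvCut_cons]
            | cons c2 rest2 =>
              obtain ⟨hci2, hrest2, _⟩ :=
                drop_cons_facts content (i + 1) c2 rest2 (by rw [← hrest, hrc])
              subst hrc
              by_cases hc2 : c2 = '\n'
              · subst hc2
                conv_lhs => rw [pvLoopA_cons]
                rw [pvBreaks]
                have hnext := ih (i + 2) (i + 2)
                  (lines ++ [String.ofList ((content.drop start).take (i - start))]) (by omega) le_rfl
                simp only [Nat.sub_self, List.take_zero,
                  show content.drop (i + 2) = rest2 from hrest2.symm] at hnext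
                rw [show i + 1 + 1 = i + 2 from rfl]
                simp [hnext, pvCut_cons]
              · conv_lhs => rw [pvLoopA_cons]
                rw [pvBreaks]
                have hnext := ih (i + 1) (i + 1)
                  (lines ++ [String.ofList ((content.drop start).take (i - start))]) (by omega) le_rfl
                simp only [Nat.sub_self, List.take_zero, ← hrest] at hnext
                simp [hnext, pvCut_cons, hc2]
          · -- ordinary character
            conv_lhs => rw [pvLoopA_cons]
            rw [pvBreaks]
            simp [hc, hnl, hcr, cur_push content start i c hci hsi]
            rw [hrest]
            exact ih (i + 1) start lines (by omega) (by omega)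

-- ===== VERDICT (by name: the statement is the Claim_ definition above) =====
theorem split_csv_lines_spec : Claim_equal_split_csv_lines := by
  intro content _
  unfold Spec_split_csv_lines split_csv_lines split_csv_lines_alt
  have := loopA_eq_cut content.toList content.toList.length 0 0 [] (by omega) (le_refl 0)
  simpa using this
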